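-- pv_equiv track=rewrite | github.com/Abdulraqib20/gemma-c2c | scripts/validate_c2c_data.py | exact_duplicate_count
-- ===== SOURCE A (Python) =====
-- from typing import Dict, Iterable, List, Tuple
--
-- def exact_duplicate_count(rows: List[dict]) -> int:
--     seen: set[str] = set()
--     dups = 0
--     for row in rows:
--         if row["norm"] in seen:
--             dups += 1
--         else:
--             seen.add(row["norm"])
--     return dups
-- ===== SOURCE B (Python) =====
-- from typing import Dict, Iterable, List, Tuple
--
-- def exact_duplicate_count(rows: List[dict]) -> int:
--     # Sort the norm values so equal values become adjacent, then count
--     # adjacent equal pairs: a value occurring k times yields k-1 such pairs.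
--     norms = sorted(row["norm"] for row in rows)
--     return sum(1 for a, b in zip(norms, norms[1:]) if a == b)
-- ===== Notes on version B (the rewrite author's own statement) =====
-- stated objective: alternative
-- what changed: Replaces A's one-pass seen-set/counter loop with a sort-then-scan: sort the norm values and count adjacent equal pairs (each value occurring k times gives k-1 adjacent equal pairs).
import Mathlib
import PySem

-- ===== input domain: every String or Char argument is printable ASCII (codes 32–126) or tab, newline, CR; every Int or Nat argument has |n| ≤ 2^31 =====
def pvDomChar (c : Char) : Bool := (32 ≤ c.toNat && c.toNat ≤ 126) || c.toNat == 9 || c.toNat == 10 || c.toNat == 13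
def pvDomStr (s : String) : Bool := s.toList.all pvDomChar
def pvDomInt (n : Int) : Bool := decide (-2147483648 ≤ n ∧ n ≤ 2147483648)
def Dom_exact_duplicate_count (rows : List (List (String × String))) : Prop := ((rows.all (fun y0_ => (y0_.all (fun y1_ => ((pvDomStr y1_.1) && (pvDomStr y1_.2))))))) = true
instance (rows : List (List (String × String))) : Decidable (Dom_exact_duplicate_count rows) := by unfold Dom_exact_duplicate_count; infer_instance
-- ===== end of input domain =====

-- B replaces A's seen-set/counter loop by sorting the norm values and counting adjacent equal pairs; equal return values proved on rows that all carry the "norm" key.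

-- ===== PORT A =====
-- row["norm"] is List.lookup "norm" row (first match, the association-list dict convention);
-- 'none' is Python's KeyError, excluded by Pre_ (the getD "" default is never reached inside Pre_).
def exact_duplicate_count (rows : List (List (String × String))) : Int :=
  (rows.foldl
    (fun (st : PySem.Set String × Int) row =>
      let v := (List.lookup "norm" row).getD ""
      if PySem.Set.contains st.1 v then (st.1, st.2 + 1)
      else (PySem.Set.add st.1 v, st.2))
    (PySem.Set.empty, 0)).2

-- ===== PORT B =====
-- norms = sorted(row["norm"] for row in rows); sum(1 for a,b in zip(norms, norms[1:]) if a == b)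
def exact_duplicate_count_alt (rows : List (List (String × String))) : Int :=
  let norms := PySem.List.sorted (rows.map (fun row => (List.lookup "norm" row).getD "")) (fun x => x) false
  (norms.zip (PySem.List.slice norms (some 1) none)).foldl
    (fun (acc : Int) p => if p.1 == p.2 then acc + 1 else acc) 0

-- ===== PRECONDITION & SPEC =====
-- Pre_ excludes rows missing the "norm" key, on which Python A raises KeyError.
def Pre_exact_duplicate_count (rows : List (List (String × String))) : Prop :=
  ∀ row ∈ rows, (List.lookup "norm" row).isSome = true
instance (rows : List (List (String × String))) : Decidable (Pre_exact_duplicate_count rows) := by unfold Pre_exact_duplicate_count; infer_instance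

def pvWitness_exact_duplicate_count : (List (List (String × String))) :=
  [[("norm", "a")], [("norm", "a")], [("norm", "b")]]

def Spec_exact_duplicate_count (rows : List (List (String × String))) (out : Int) : Prop := out = exact_duplicate_count_alt rows
instance (rows : List (List (String × String))) (out : Int) : Decidable (Spec_exact_duplicate_count rows out) := by unfold Spec_exact_duplicate_count; infer_instance

-- ===== CLAIM =====
def Claim_equal_exact_duplicate_count : Prop := ∀ (rows : List (List (String × String))), Dom_exact_duplicate_count rows → Pre_exact_duplicate_count rows → Spec_exact_duplicate_count rows (exact_duplicate_count rows)

-- ===== LEMMAS AND PROOFS =====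

-- Loop invariant of A's fold over the list of norm values: final counter plus the
-- size of the final seen set equals the starting counter plus values consumed plus starting set size.
theorem dup_loop_invariant (ks : List String) (s : PySem.Set String) (d : Int) :
    (ks.foldl
      (fun (st : PySem.Set String × Int) v =>
        if PySem.Set.contains st.1 v then (st.1, st.2 + 1)
        else (PySem.Set.add st.1 v, st.2)) (s, d)).2
      + ((PySem.Set.update s ks).length : Int)
    = d + ks.length + s.length := by
  induction ks generalizing s d with
  | nil => simp [PySem.Set.update]
  | cons v ks ih =>
    have hupd : ∀ t : PySem.Set String,
        PySem.Set.update t (v :: ks) = PySem.Set.update (PySem.Set.add t v) ks := fun _ => rfl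
    rw [List.foldl_cons, hupd]
    by_cases hv : v ∈ s
    · have hc : PySem.Set.contains s v = true := by
        simp [PySem.Set.contains, hv]
      simp only [hc, if_true, PySem.Set.add_of_mem hv, List.length_cons]
      have h1 := ih s (d + 1)
      push_cast at h1 ⊢; linarith
    · have hc : PySem.Set.contains s v = false := by
        simp [PySem.Set.contains, hv]
      simp only [hc, Bool.false_eq_true, if_false, PySem.Set.add_of_not_mem hv, List.length_cons]
      have h1 := ih (s ++ [v]) d
      simp only [List.length_append, List.length_singleton] at h1
      push_cast at h1 ⊢; linarith

-- B's inner sum as a recursion on the sorted list.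
theorem adj_fold_shift (l : List (String × String)) (c : Int) :
    l.foldl (fun (acc : Int) p => if p.1 == p.2 then acc + 1 else acc) c
      = c + l.foldl (fun (acc : Int) p => if p.1 == p.2 then acc + 1 else acc) 0 := by
  induction l generalizing c with
  | nil => simp
  | cons p t ih =>
    simp only [List.foldl_cons]
    rw [ih, ih (if p.1 == p.2 then (0:Int) + 1 else 0)]
    split_ifs <;> ring

-- On a (≤)-sorted list, the number of adjacent equal pairs plus the number of
-- distinct values equals the length.
theorem adj_count_sorted (l : List String) (h : l.Pairwise (· ≤ ·)) :
    (l.zip l.tail).foldl (fun (acc : Int) p => if p.1 == p.2 then acc + 1 else acc) 0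
      + (l.toFinset.card : Int) = l.length := by
  induction l with
  | nil => simp
  | cons a t ih =>
    cases t with
    | nil => simp
    | cons b t' =>
      have hpair := h
      rw [List.pairwise_cons] at hpair
      obtain ⟨hale, htail⟩ := hpair
      have hrest := ih htail
      simp only [List.tail_cons, List.zip_cons_cons, List.foldl_cons]
      rw [adj_fold_shift]
      by_cases hab : a = b
      · have hmem : a ∈ (b :: t').toFinset := by simp [hab]
        have hcard : (a :: b :: t').toFinset.card = (b :: t').toFinset.card := by
          rw [List.toFinset_cons, Finset.card_insert_of_mem hmem]
        simp only [beq_iff_eq, hab, if_true] at *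
        simp only [List.tail_cons] at hrest
        rw [hcard]
        simp only [List.length_cons] at *
        push_cast at hrest ⊢; linarith
      · have hnotmem : a ∉ (b :: t').toFinset := by
          simp only [List.mem_toFinset, List.mem_cons]
          rintro (rfl | hin)
          · exact hab rfl
          · have hbx : b ≤ a := (List.pairwise_cons.mp htail).1 a hin
            exact hab (le_antisymm (hale b (List.mem_cons_self)) hbx)
        have hcard : (a :: b :: t').toFinset.card = (b :: t').toFinset.card + 1 := by
          rw [List.toFinset_cons, Finset.card_insert_of_notMem hnotmem]
        have hne : (a == b) = false := by simp [hab]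
        simp only [hne, Bool.false_eq_true, if_false]
        simp only [List.tail_cons] at hrest
        rw [hcard]
        simp only [List.length_cons] at *
        push_cast at hrest ⊢; linarith

-- The distinct-count of a PySem set built from a list is the list's Finset card.
theorem ofList_length_eq_card (l : List String) :
    (PySem.Set.ofList l).length = l.toFinset.card := by
  have hnd : (PySem.Set.ofList l).Nodup := PySem.Set.nodup_ofList l
  have hts : (PySem.Set.ofList l).toFinset = l.toFinset := by
    ext x; simp [PySem.Set.mem_ofList]
  rw [← List.toFinset_card_of_nodup hnd, hts]

-- ===== VERDICT =====
theorem exact_duplicate_count_spec : Claim_equal_exact_duplicate_count := by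
  intro rows _ _
  unfold Spec_exact_duplicate_count exact_duplicate_count exact_duplicate_count_alt
  set ns := rows.map (fun row => (List.lookup "norm" row).getD "") with hns
  -- A's side: counter = length - distinct count
  rw [show (rows.foldl
        (fun (st : PySem.Set String × Int) row =>
          let v := (List.lookup "norm" row).getD ""
          if PySem.Set.contains st.1 v then (st.1, st.2 + 1)
          else (PySem.Set.add st.1 v, st.2)) (PySem.Set.empty, 0))
      = (ns.foldl
        (fun (st : PySem.Set String × Int) v =>
          if PySem.Set.contains st.1 v then (st.1, st.2 + 1)
          else (PySem.Set.add st.1 v, st.2)) (PySem.Set.empty, 0))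
      by rw [hns, List.foldl_map]]
  have hA := dup_loop_invariant ns PySem.Set.empty 0
  have hof : PySem.Set.update PySem.Set.empty ns = PySem.Set.ofList ns := rfl
  rw [hof, ofList_length_eq_card] at hA
  simp only [PySem.Set.empty, List.length_nil] at hA
  -- B's side: adjacent equal pairs of the sorted list
  set sl := PySem.List.sorted ns (fun x => x) false with hsl
  have hperm : sl.Perm ns := PySem.List.sorted_perm ns (fun x => x) false
  have hsorted : sl.Pairwise (· ≤ ·) := PySem.List.sorted_pairwise ns (fun x => x)
  have hB := adj_count_sorted sl hsorted
  simp only [PySem.List.slice_from_one]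
  have hlen : sl.length = ns.length := hperm.length_eq
  have hcard : sl.toFinset.card = ns.toFinset.card := by
    congr 1; ext x; simp [hperm.mem_iff]
  rw [hlen, hcard] at hB
  simp only [PySem.Set.empty] at hA ⊢
  push_cast at hA hB ⊢
  linarith
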